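-- pv_equiv track=rewrite | github.com/AhnJooeon/kobok | Convert_Long_03.py | detect_first_cycle
-- ===== SOURCE A (Python) =====
-- def detect_first_cycle(codes: list[str]) -> list[str]:
--     if not codes:
--         return []
--     compact = [codes[0]] + [c for i, c in enumerate(codes[1:], 1) if c != codes[i-1]]
--     pattern = []
--     for c in compact:
--         if not pattern:
--             pattern.append(c); continue
--         if c == pattern[0]:
--             break
--         if c not in pattern:
--             pattern.append(c)
--     return pattern if pattern else [compact[0]]
-- ===== SOURCE B (Python) =====
-- def detect_first_cycle(codes: list[str]) -> list[str]:
--     if not codes: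
--         return []
--     head = codes[0]
--     cut, prev = 1, head
--     for c in codes[1:]:
--         if c == head and prev != head:
--             break
--         cut += 1
--         prev = c
--     return list(dict.fromkeys(codes[:cut]))
-- ===== Notes on version B (the rewrite author's own statement) =====
-- stated objective: faster
-- what changed: B never constructs A's consecutive-dedup list 'compact' at all: it locates the cycle boundary directly on the raw codes (break at the first element equal to the head whose predecessor is not the head) and returns dict.fromkeys of that raw prefix, using the fact that order-preserving distinct-dedup makes the run-collapsing pass redundant.
import Mathlib
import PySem

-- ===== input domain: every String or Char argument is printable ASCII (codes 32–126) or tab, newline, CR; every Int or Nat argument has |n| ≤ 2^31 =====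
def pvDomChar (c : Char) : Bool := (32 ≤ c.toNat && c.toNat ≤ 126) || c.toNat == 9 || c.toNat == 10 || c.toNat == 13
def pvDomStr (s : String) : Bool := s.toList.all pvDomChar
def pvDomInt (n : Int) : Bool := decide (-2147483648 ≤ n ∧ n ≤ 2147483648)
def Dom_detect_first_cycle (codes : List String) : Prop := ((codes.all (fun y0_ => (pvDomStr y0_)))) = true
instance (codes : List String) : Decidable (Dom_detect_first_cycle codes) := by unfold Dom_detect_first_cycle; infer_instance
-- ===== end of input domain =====

-- B never builds A's consecutive-dedup list: it finds the cycle boundary directly on the raw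
-- codes (first element equal to the head whose predecessor is not the head) and returns the
-- order-preserving distinct elements of that raw prefix; a timing run measures the speed.

-- ===== PORT A =====
-- the 'for c in compact' loop of A, with its early 'break'
def patLoop : List String → List String → List String
  | [], pat => pat
  | c :: cs, pat =>
    if pat.isEmpty then patLoop cs (pat ++ [c])
    else if some c = PySem.List.pyGet? pat 0 then pat
    else if pat.contains c then patLoop cs pat
    else patLoop cs (pat ++ [c])

def detect_first_cycle (codes : List String) : List String :=
  match codes with
  | [] => []
  | c0 :: _ =>
    let compact := c0 :: (PySem.List.enumerate (PySem.List.slice codes (some 1) none) 1).filterMap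
        (fun p => if PySem.List.pyGet? codes (p.1 - 1) ≠ some p.2 then some p.2 else none)
    let pattern := patLoop compact []
    if pattern.isEmpty then [PySem.List.pyGetD compact 0 ""] else pattern

-- ===== PORT B =====
-- the 'for c in codes[1:]' counting loop of B: number of further elements taken before the break
def bCut (head : String) : String → List String → Nat
  | _, [] => 0
  | prev, c :: cs => if c = head ∧ prev ≠ head then 0 else 1 + bCut head c cs

def detect_first_cycle_alt (codes : List String) : List String :=
  match codes with
  | [] => []
  | head :: rest =>
    let cut : Nat := 1 + bCut head head rest
    PySem.List.dedup (PySem.List.slice codes none (some (cut : Int)))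

-- ===== PRECONDITION & SPEC =====
def Spec_detect_first_cycle (codes : List String) (out : List String) : Prop := out = detect_first_cycle_alt codes
instance (codes : List String) (out : List String) : Decidable (Spec_detect_first_cycle codes out) := by unfold Spec_detect_first_cycle; infer_instance

-- ===== CLAIM (what is proved, stated in full; the proofs are below) =====
def Claim_equal_detect_first_cycle : Prop := ∀ (codes : List String), Dom_detect_first_cycle codes → Spec_detect_first_cycle codes (detect_first_cycle codes)

-- ===== LEMMAS AND PROOFS =====

-- clean specification of the consecutive-dedup step: keep c iff c ≠ its predecessor (prev = predecessor of the head)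
def da (prev : String) : List String → List String
  | [] => []
  | c :: cs => if c = prev then da c cs else c :: da c cs

-- A's comprehension over enumerate equals da
theorem a_compact_eq (l : List String) : ∀ (pre : List String) (hp : pre ≠ []),
    (PySem.List.enumerate l pre.length).filterMap
        (fun p => if PySem.List.pyGet? (pre ++ l) (p.1 - 1) ≠ some p.2 then some p.2 else none)
      = da (pre.getLast hp) l := by
  induction l with
  | nil => intro pre hp; simp [PySem.List.enumerate, da]
  | cons c cs ih =>
    intro pre hp
    rw [PySem.List.enumerate_cons]
    have hidx : PySem.List.pyGet? (pre ++ c :: cs) ((pre.length : Int) - 1) = some (pre.getLast hp) := by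
      have h1 : ((pre.length : Int) - 1) = ((pre.length - 1 : Nat) : Int) := by
        have := List.length_pos_iff.mpr hp
        omega
      rw [h1, PySem.List.pyGet?_natCast]
      rw [List.getElem?_append_left (by have := List.length_pos_iff.mpr hp; omega)]
      rw [List.getLast_eq_getElem]
      simp
    have hpre' : pre ++ [c] ≠ [] := by simp
    have hrec := ih (pre ++ [c]) hpre'
    have hlast : (pre ++ [c]).getLast hpre' = c := by simp
    have hlen : (pre ++ [c]).length = pre.length + 1 := by simp
    have happ : pre ++ c :: cs = (pre ++ [c]) ++ cs := by simp
    by_cases hc : c = pre.getLast hp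
    · rw [List.filterMap_cons_none (by rw [hidx]; simp [hc])]
      have hda : da (pre.getLast hp) (c :: cs) = da c cs := by simp [da, hc]
      rw [hda, happ, show ((pre.length : Int) + 1) = (((pre ++ [c]).length : Nat) : Int) by simp]
      rw [hlast] at hrec; exact hrec
    · rw [List.filterMap_cons_some (by rw [hidx, if_pos (by simpa using fun h => hc (Eq.symm h))])]
      have hda : da (pre.getLast hp) (c :: cs) = c :: da c cs := by simp [da, hc]
      rw [hda, happ, show ((pre.length : Int) + 1) = (((pre ++ [c]).length : Nat) : Int) by simp]
      rw [hlast] at hrec; rw [hrec]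

-- patLoop on a nonempty pattern is Set.add-folding the ≠-head prefix
theorem patLoop_eq (R : List String) : ∀ (pat : List String) (h : pat ≠ []),
    patLoop R pat = (R.takeWhile (fun c => c ≠ pat.head h)).foldl PySem.Set.add pat := by
  induction R with
  | nil => intro pat h; simp [patLoop]
  | cons c cs ih =>
    intro pat h
    simp only [patLoop, List.isEmpty_iff, if_neg h]
    have hget : PySem.List.pyGet? pat 0 = some (pat.head h) := by
      cases pat with
      | nil => exact absurd rfl h
      | cons a as => simp [PySem.List.pyGet?, PySem.List.pyIdx?]
    rw [hget]
    by_cases hc : c = pat.head h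
    · rw [if_pos (by rw [hc])]
      have htw : List.takeWhile (fun x => decide (x ≠ pat.head h)) (c :: cs) = [] := by
        rw [List.takeWhile_cons, if_neg (by simp [hc])]
      rw [htw, List.foldl_nil]
    · rw [if_neg (by simpa using hc)]
      have htw : List.takeWhile (fun x => decide (x ≠ pat.head h)) (c :: cs) =
          c :: List.takeWhile (fun x => decide (x ≠ pat.head h)) cs := by
        rw [List.takeWhile_cons, if_pos (by simpa using hc)]
      rw [htw, List.foldl_cons]
      by_cases hm : c ∈ pat
      · rw [if_pos (List.contains_iff_mem.mpr hm), ih pat h]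
        have : PySem.Set.add pat c = pat := by simp [PySem.Set.add, hm]
        rw [this]
      · rw [if_neg (fun hx => hm (List.contains_iff_mem.mp hx))]
        have hadd : PySem.Set.add pat c = pat ++ [c] := by simp [PySem.Set.add, hm]
        have hne : pat ++ [c] ≠ [] := by simp
        have hh : (pat ++ [c]).head hne = pat.head h := List.head_append_of_ne_nil h
        rw [ih (pat ++ [c]) hne, hadd, hh]

theorem foldl_add_ne_nil (l : List String) : ∀ (pat : List String), pat ≠ [] →
    l.foldl PySem.Set.add pat ≠ [] := by
  induction l with
  | nil => intro pat h; simpa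
  | cons c cs ih =>
    intro pat h
    rw [List.foldl_cons]
    apply ih
    simp only [PySem.Set.add]
    split
    · exact h
    · simp

theorem dedup_cons (c0 : String) (T : List String) :
    PySem.List.dedup (c0 :: T) = T.foldl PySem.Set.add [c0] := by
  rw [PySem.List.dedup_eq_ofList, PySem.Set.ofList_eq_foldl, List.foldl_cons]
  simp [PySem.Set.add]

-- key bridge: Set.add-folding the ≠-head prefix of the run-collapsed list equals
-- Set.add-folding the raw prefix cut by bCut (consecutive duplicates are absorbed by Set.add)
theorem fold_da_take (c0 : String) (l : List String) : ∀ (prev : String) (acc : List String),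
    prev ∈ acc → c0 ∈ acc →
    ((da prev l).takeWhile (fun c => c ≠ c0)).foldl PySem.Set.add acc
      = (l.take (bCut c0 prev l)).foldl PySem.Set.add acc := by
  induction l with
  | nil => intro prev acc _ _; simp [da, bCut]
  | cons c cs ih =>
    intro prev acc hprev hc0
    by_cases hcp : c = prev
    · -- run continues: da collapses c; bCut cannot break (c = prev)
      have hnb : ¬(c = c0 ∧ prev ≠ c0) := by rintro ⟨rfl, hne⟩; exact hne hcp.symm
      rw [show da prev (c :: cs) = da c cs by simp [da, hcp],
          show bCut c0 prev (c :: cs) = 1 + bCut c0 c cs by simp [bCut, hnb]]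
      rw [show (1 + bCut c0 c cs) = bCut c0 c cs + 1 by omega, List.take_succ_cons,
          List.foldl_cons,
          show PySem.Set.add acc c = acc by simp [PySem.Set.add]; exact hcp ▸ hprev]
      exact ih c acc (hcp ▸ hprev) hc0
    · by_cases hch : c = c0
      · -- break on both sides
        have hpne : prev ≠ c0 := fun h => hcp (hch.trans h.symm)
        rw [show da prev (c :: cs) = c :: da c cs by simp [da, hcp],
            show bCut c0 prev (c :: cs) = 0 by simp [bCut, hch, hpne]]
        rw [List.takeWhile_cons, if_neg (by simp [hch])]
        simp
      · -- both sides take c and continue with acc' = Set.add acc c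
        rw [show da prev (c :: cs) = c :: da c cs by simp [da, hcp],
            show bCut c0 prev (c :: cs) = 1 + bCut c0 c cs by
              simp [bCut]; intro h; exact absurd h hch]
        rw [List.takeWhile_cons, if_pos (by simp [hch]),
            show (1 + bCut c0 c cs) = bCut c0 c cs + 1 by omega, List.take_succ_cons,
            List.foldl_cons, List.foldl_cons]
        have hmem : c ∈ PySem.Set.add acc c := by
          simp [PySem.Set.add]; split <;> simp_all
        have hc0' : c0 ∈ PySem.Set.add acc c := by
          simp [PySem.Set.add]; split <;> simp [hc0]
        exact ih c (PySem.Set.add acc c) hmem hc0'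

-- ===== VERDICT (by name: the statement is the Claim_ definition above) =====
theorem detect_first_cycle_spec : Claim_equal_detect_first_cycle := by
  intro codes _
  unfold Spec_detect_first_cycle detect_first_cycle detect_first_cycle_alt
  cases codes with
  | nil => simp
  | cons c0 rest =>
    have hA : (PySem.List.enumerate (PySem.List.slice (c0 :: rest) (some 1) none) 1).filterMap
        (fun p => if PySem.List.pyGet? (c0 :: rest) (p.1 - 1) ≠ some p.2 then some p.2 else none)
        = da c0 rest := by
      have h1 := a_compact_eq rest [c0] (by simp)
      simpa only [List.cons_append, List.nil_append, List.length_cons, List.length_nil,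
        Nat.zero_add, Nat.cast_one, List.getLast_singleton,
        PySem.List.slice_from_one, List.tail_cons] using h1
    rw [hA]
    dsimp only
    set R := da c0 rest with hR
    have hstep : patLoop (c0 :: R) [] = patLoop R [c0] := by simp [patLoop]
    have hpat : patLoop (c0 :: R) [] =
        (R.takeWhile (fun c => decide (c ≠ c0))).foldl PySem.Set.add [c0] := by
      rw [hstep]; exact patLoop_eq R [c0] (by simp)
    have hne2 : ¬((R.takeWhile (fun c => decide (c ≠ c0))).foldl PySem.Set.add [c0]).isEmpty = true := by
      rw [List.isEmpty_iff]; exact foldl_add_ne_nil _ [c0] (by simp)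
    rw [hpat, if_neg hne2]
    rw [PySem.List.slice_to_natCast,
        show (1 + bCut c0 c0 rest) = bCut c0 c0 rest + 1 by omega, List.take_succ_cons,
        dedup_cons]
    exact fold_da_take c0 rest c0 [c0] (by simp) (by simp)
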